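-- pv_equiv track=rewrite | github.com/aaronstrephans-dot/music-scheduler | engine/rotator.py | _build_pool_try_order
-- ===== SOURCE A (Python) =====
-- def _build_pool_try_order(slot: dict, by_cat: dict, cat_lookup: dict) -> list:
--     """
--     Return a list of (pool, category_name) in try order: primary first, then
--     alternate1, alternate2, alternate3. Only includes (pool, cat) where pool is non-empty.
--     Caller should try each in order and use the first that yields eligible tracks.
--     """
--     category = slot.get("category", "")
--     out = []
--     primary_pool = by_cat.get(category) or []
--     if primary_pool:
--         out.append((primary_pool, category))
--
--     cat_rec = cat_lookup.get(category)
--     if cat_rec: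
--         for alt_key in ("alternate1", "alternate2", "alternate3"):
--             alt_id = cat_rec.get(alt_key)
--             if alt_id:
--                 alt_pool = by_cat.get(alt_id) or []
--                 if alt_pool:
--                     out.append((alt_pool, alt_id))
--
--     return out
-- ===== SOURCE B (Python) =====
-- def _build_pool_try_order(slot: dict, by_cat: dict, cat_lookup: dict) -> list:
--     # Recursive back-to-front construction: the alternate suffix is built by
--     # structural recursion on the remaining key list, then the primary entry
--     # (if its pool is non-empty) is prepended.
--     category = slot.get("category", "")
--     cat_rec = cat_lookup.get(category)
--
--     def rest(keys):
--         if not keys: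
--             return []
--         tail = rest(keys[1:])
--         aid = cat_rec.get(keys[0])
--         if aid:
--             pool = by_cat.get(aid) or []
--             if pool:
--                 return [(pool, aid)] + tail
--         return tail
--
--     alts = rest(["alternate1", "alternate2", "alternate3"]) if cat_rec else []
--     pool = by_cat.get(category) or []
--     return ([(pool, category)] if pool else []) + alts
-- ===== Notes on version B (the rewrite author's own statement) =====
-- stated objective: alternative
-- what changed: B replaces A's imperative forward loop with appends by a structurally recursive helper that builds the alternate suffix back-to-front over the remaining key list, then prepends the primary entry; same order and values by a fold-to-recursion correspondence.
import Mathlib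
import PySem

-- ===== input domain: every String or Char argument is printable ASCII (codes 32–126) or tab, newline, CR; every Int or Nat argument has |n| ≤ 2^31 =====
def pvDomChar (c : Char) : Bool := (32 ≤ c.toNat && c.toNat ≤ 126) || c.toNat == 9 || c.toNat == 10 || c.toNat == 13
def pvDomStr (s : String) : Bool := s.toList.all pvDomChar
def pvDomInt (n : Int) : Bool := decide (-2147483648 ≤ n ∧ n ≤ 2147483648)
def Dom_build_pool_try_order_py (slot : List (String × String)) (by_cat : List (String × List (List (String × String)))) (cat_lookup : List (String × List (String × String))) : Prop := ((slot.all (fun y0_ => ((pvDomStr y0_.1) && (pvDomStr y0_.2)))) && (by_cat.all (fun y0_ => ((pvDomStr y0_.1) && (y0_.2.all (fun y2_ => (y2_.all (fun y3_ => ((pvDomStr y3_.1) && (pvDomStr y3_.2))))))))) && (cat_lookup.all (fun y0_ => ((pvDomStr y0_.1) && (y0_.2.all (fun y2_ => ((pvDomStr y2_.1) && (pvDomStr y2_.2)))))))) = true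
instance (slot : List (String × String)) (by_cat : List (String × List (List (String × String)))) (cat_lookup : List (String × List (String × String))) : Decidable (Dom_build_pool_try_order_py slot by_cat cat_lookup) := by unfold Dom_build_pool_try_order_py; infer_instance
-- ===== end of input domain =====

-- B builds the alternate suffix by structural recursion back-to-front and prepends the primary entry (return-value equivalence; objective: alternative decomposition, same cost).


-- ===== PORT A =====
def build_pool_try_order_py (slot : List (String × String)) (by_cat : List (String × List (List (String × String)))) (cat_lookup : List (String × List (String × String))) : List ((List (List (String × String))) × String) :=
  let category := (PySem.Dict.mk slot).getD "category" ""
  let out : List ((List (List (String × String))) × String) := []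
  let primary_pool := ((PySem.Dict.mk by_cat).get? category).getD []
  let out := if primary_pool ≠ [] then out ++ [(primary_pool, category)] else out
  match (PySem.Dict.mk cat_lookup).get? category with
  | none => out
  | some cat_rec =>
    if cat_rec ≠ [] then
      ["alternate1", "alternate2", "alternate3"].foldl (fun acc alt_key =>
        match (PySem.Dict.mk cat_rec).get? alt_key with
        | none => acc
        | some alt_id =>
          if alt_id ≠ "" then
            let alt_pool := ((PySem.Dict.mk by_cat).get? alt_id).getD []
            if alt_pool ≠ [] then acc ++ [(alt_pool, alt_id)] else acc
          else acc) out
    else out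

-- ===== PORT B =====
-- `rest` of Source B: structural recursion on the remaining key list, building the suffix back-to-front.
def bpto_rest (by_cat : List (String × List (List (String × String)))) (cat_rec : List (String × String)) : List String → List ((List (List (String × String))) × String)
  | [] => []
  | k :: ks =>
    let tail := bpto_rest by_cat cat_rec ks
    match (PySem.Dict.mk cat_rec).get? k with
    | none => tail
    | some aid =>
      if aid ≠ "" then
        let pool := ((PySem.Dict.mk by_cat).get? aid).getD []
        if pool ≠ [] then (pool, aid) :: tail else tail
      else tail

def build_pool_try_order_py_alt (slot : List (String × String)) (by_cat : List (String × List (List (String × String)))) (cat_lookup : List (String × List (String × String))) : List ((List (List (String × String))) × String) :=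
  let category := (PySem.Dict.mk slot).getD "category" ""
  let cat_rec? := (PySem.Dict.mk cat_lookup).get? category
  let alts := match cat_rec? with
    | none => []
    | some cat_rec => if cat_rec ≠ [] then bpto_rest by_cat cat_rec ["alternate1", "alternate2", "alternate3"] else []
  let pool := ((PySem.Dict.mk by_cat).get? category).getD []
  (if pool ≠ [] then [(pool, category)] else []) ++ alts

-- ===== PRECONDITION & SPEC =====
def Spec_build_pool_try_order_py (slot : List (String × String)) (by_cat : List (String × List (List (String × String)))) (cat_lookup : List (String × List (String × String))) (out : List ((List (List (String × String))) × String)) : Prop := out = build_pool_try_order_py_alt slot by_cat cat_lookup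
instance (slot : List (String × String)) (by_cat : List (String × List (List (String × String)))) (cat_lookup : List (String × List (String × String))) (out : List ((List (List (String × String))) × String)) : Decidable (Spec_build_pool_try_order_py slot by_cat cat_lookup out) := by unfold Spec_build_pool_try_order_py; infer_instance

-- ===== CLAIM (what is proved, stated in full; the proofs are below) =====
def Claim_equal_build_pool_try_order_py : Prop := ∀ (slot : List (String × String)) (by_cat : List (String × List (List (String × String)))) (cat_lookup : List (String × List (String × String))), Dom_build_pool_try_order_py slot by_cat cat_lookup → Spec_build_pool_try_order_py slot by_cat cat_lookup (build_pool_try_order_py slot by_cat cat_lookup)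

-- ===== LEMMAS AND PROOFS =====
-- A's foldl over the key list equals the accumulator followed by B's recursively built suffix.
lemma bpto_foldl_eq_rest (cat_rec : List (String × String))
    (by_cat : List (String × List (List (String × String))))
    (L : List String) (acc : List ((List (List (String × String))) × String)) :
    L.foldl (fun acc alt_key =>
      match (PySem.Dict.mk cat_rec).get? alt_key with
      | none => acc
      | some alt_id =>
        if alt_id ≠ "" then
          let alt_pool := ((PySem.Dict.mk by_cat).get? alt_id).getD []
          if alt_pool ≠ [] then acc ++ [(alt_pool, alt_id)] else acc
        else acc) acc
    = acc ++ bpto_rest by_cat cat_rec L := by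
  induction L generalizing acc with
  | nil => simp [bpto_rest]
  | cons k L ih =>
    simp only [List.foldl_cons, bpto_rest]
    cases (PySem.Dict.mk cat_rec).get? k with
    | none => exact ih acc
    | some aid =>
      by_cases hid : aid = ""
      · simp only [hid, ne_eq, not_true_eq_false, if_false]; exact ih acc
      · simp only [ne_eq, hid, not_false_eq_true, if_true]
        by_cases hp : ((PySem.Dict.mk by_cat).get? aid).getD [] = []
        · simp only [hp, not_true_eq_false, if_false]; exact ih acc
        · simp only [hp, not_false_eq_true, if_true, ih, List.append_assoc,
            List.singleton_append]

-- ===== VERDICT (by name: the statement is the Claim_ definition above) =====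
theorem build_pool_try_order_py_spec : Claim_equal_build_pool_try_order_py := by
  intro slot by_cat cat_lookup _
  unfold Spec_build_pool_try_order_py build_pool_try_order_py build_pool_try_order_py_alt
  cases h : ((PySem.Dict.mk cat_lookup).get? ((PySem.Dict.mk slot).getD "category" "")) with
  | none => simp only [h]; split_ifs <;> rfl
  | some cat_rec =>
    by_cases hr : cat_rec = []
    · simp only [h, hr, ne_eq, not_true_eq_false, if_false]
      split_ifs <;> rfl
    · simp only [h, ne_eq, hr, not_false_eq_true, if_true,
        bpto_foldl_eq_rest cat_rec by_cat]
      split_ifs <;> simp
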